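-- pv_equiv track=rewrite | github.com/rotan96/texscii | texscii(old).py | removeArg
-- ===== SOURCE A (Python) =====
-- def removeArg(l):
--     #removes first argument
--     openInd, closeInd = 0, 0
--     for i in range(len(l)):
--         if l[i] == "{":
--             openInd = i
--         elif l[i] == "}":
--             closeInd = i
--             # print openInd, closeInd,  l[:openInd] + l[closeInd + 1:]
--             return l[:openInd] + l[closeInd + 1:]
-- ===== SOURCE B (Python) =====
-- def removeArg(l):
--     # two-phase: locate the first '}' with str.find, then scan backward for
--     # the nearest '{' before it (default 0); A's single forward scan merged both.
--     closeInd = l.find('}')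
--     if closeInd == -1:
--         return None
--     openInd = 0
--     for i in range(closeInd - 1, -1, -1):
--         if l[i] == '{':
--             openInd = i
--             break
--     return l[:openInd] + l[closeInd + 1:]
-- ===== Notes on version B (the rewrite author's own statement) =====
-- stated objective: simpler
-- what changed: Replaces A's single forward interpreted scan that tracks both braces and returns mid-loop with a two-phase version: the C-level str.find locates the first '}', then a short backward scan with early break finds the nearest '{' before it. Pre_ excludes strings containing no '}', where A falls through and returns None (not a string); B returns None there too.
-- outside the precondition, e.g. on removeArg('abc'): A returns None, B returns None; on removeArg('{'): A returns None, B returns None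
import Mathlib
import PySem

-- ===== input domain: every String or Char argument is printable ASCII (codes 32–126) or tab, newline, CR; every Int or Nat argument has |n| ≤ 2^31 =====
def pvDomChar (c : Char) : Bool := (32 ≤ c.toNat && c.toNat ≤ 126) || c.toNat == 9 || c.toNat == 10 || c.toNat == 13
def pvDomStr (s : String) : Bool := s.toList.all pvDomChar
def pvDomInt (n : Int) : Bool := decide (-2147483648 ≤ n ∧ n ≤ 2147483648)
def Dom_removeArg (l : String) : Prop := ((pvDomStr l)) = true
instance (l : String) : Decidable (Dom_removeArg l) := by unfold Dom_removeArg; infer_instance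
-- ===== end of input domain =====

-- B changes the decomposition: first find the first '}', then scan backward for the '{';
-- objective: simpler. A returns None (no string) when '}' is absent — excluded by Pre_.

-- ===== PORT A =====
-- the for-loop with mid-loop return; openInd is the last '{' seen so far.
-- l[:openInd] / l[closeInd+1:] with in-range Nat indices are exactly take/drop.
def removeArgGo (l : List Char) (i openInd : Nat) : Option (List Char) :=
  if h : i < l.length then
    if l[i] = '{' then removeArgGo l (i + 1) i
    else if l[i] = '}' then some (l.take openInd ++ l.drop (i + 1))
    else removeArgGo l (i + 1) openInd
  else none
termination_by l.length - i

def removeArg (l : String) : String :=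
  String.ofList ((removeArgGo l.toList 0 0).getD [])   -- None branch is outside Pre_

-- ===== PORT B =====
-- the backward for-loop with break: scans i = c-1, …, 0, returns the first '{' hit, else 0
def altFindOpen (l : List Char) : Nat → Nat
  | 0 => 0
  | k + 1 => if l[k]? = some '{' then k else altFindOpen l k

def removeArg_alt (l : String) : String :=
  let closeInd := PySem.Str.find l "}"
  if closeInd = -1 then ""                          -- Python B returns None here; outside Pre_
  else
    let c := closeInd.toNat
    let openInd := altFindOpen l.toList c
    String.ofList (l.toList.take openInd ++ l.toList.drop (c + 1))

-- ===== PRECONDITION & SPEC =====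
-- Pre_ excludes strings containing no '}': A falls off the loop and returns None, not a string.
def Pre_removeArg (l : String) : Prop := '}' ∈ l.toList
instance (l : String) : Decidable (Pre_removeArg l) := by unfold Pre_removeArg; infer_instance
def pvWitness_removeArg : String := "a{b}c"

def Spec_removeArg (l : String) (out : String) : Prop := out = removeArg_alt l
instance (l : String) (out : String) : Decidable (Spec_removeArg l out) := by unfold Spec_removeArg; infer_instance

-- ===== CLAIM (what is proved, stated in full; the proofs are below) =====
def Claim_equal_removeArg : Prop := ∀ (l : String), Dom_removeArg l → Pre_removeArg l → Spec_removeArg l (removeArg l)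

-- ===== LEMMAS AND PROOFS =====

-- proof-side: forward tracking of the last '{' in [i, c), default op
def lastBrace (l : List Char) (c : Nat) (i op : Nat) : Nat :=
  if h : i < c then
    if l[i]? = some '{' then lastBrace l c (i + 1) i else lastBrace l c (i + 1) op
  else op
termination_by c - i

theorem lastBrace_snoc (l : List Char) (c : Nat) :
    ∀ i op, i ≤ c → lastBrace l (c + 1) i op =
      (if l[c]? = some '{' then c else lastBrace l c i op) := by
  intro i op h
  induction hn : c - i generalizing i op with
  | zero =>
    have hi : i = c := by omega
    subst hi
    rw [lastBrace]
    simp only [Nat.lt_succ_self, dif_pos]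
    split
    · rw [lastBrace]; simp
    · conv_rhs => rw [lastBrace]
      rw [lastBrace]; simp
  | succ n ih =>
    have hi : i < c := by omega
    rw [lastBrace]
    conv_rhs => rw [lastBrace]
    simp only [show i < c + 1 by omega, hi, dif_pos]
    by_cases hbr : l[i]? = some '{'
    · simp only [hbr, if_pos]
      rw [ih (i + 1) i (by omega) (by omega)]
    · simp only [hbr, if_false]
      rw [ih (i + 1) op (by omega) (by omega)]

theorem lastBrace_eq_altFindOpen (l : List Char) (c : Nat) :
    lastBrace l c 0 0 = altFindOpen l c := by
  induction c with
  | zero => simp [lastBrace, altFindOpen]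
  | succ k ih =>
    rw [lastBrace_snoc l k 0 0 (Nat.zero_le _), ih]
    simp [altFindOpen]

theorem removeArgGo_spec (l : List Char) (c : Nat) (hc : c < l.length) (hcv : l[c] = '}')
    (hmin : ∀ j, j < c → l[j]? ≠ some '}') :
    ∀ i op, i ≤ c →
      removeArgGo l i op = some (l.take (lastBrace l c i op) ++ l.drop (c + 1)) := by
  intro i op h
  induction hn : c - i generalizing i op with
  | zero =>
    have hi : i = c := by omega
    subst hi
    rw [removeArgGo]
    simp only [hc, dif_pos]
    rw [if_neg (by simp [hcv]), if_pos hcv]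
    rw [lastBrace]; simp
  | succ n ih =>
    have hi : i < c := by omega
    have hil : i < l.length := by omega
    have hne : l[i] ≠ '}' := by
      have := hmin i hi
      simpa [List.getElem?_eq_getElem hil] using this
    rw [removeArgGo]
    simp only [hil, dif_pos]
    by_cases hbr : l[i] = '{'
    · rw [if_pos hbr, ih (i + 1) i (by omega) (by omega)]
      conv_rhs => rw [lastBrace]
      simp [hi, List.getElem?_eq_getElem hil, hbr]
    · rw [if_neg hbr, if_neg hne, ih (i + 1) op (by omega) (by omega)]
      conv_rhs => rw [lastBrace]
      simp [hi, List.getElem?_eq_getElem hil, hbr]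

theorem singleton_prefix_iff_head? (a : Char) (xs : List Char) :
    [a] <+: xs ↔ xs.head? = some a := by
  cases xs with
  | nil => simp
  | cons b t => simp [List.cons_prefix_cons, eq_comm]

theorem singleton_prefix_drop (l : List Char) (c : Nat) (ch : Char) :
    [ch] <+: l.drop c ↔ l[c]? = some ch := by
  rw [singleton_prefix_iff_head?, List.head?_drop]

theorem removeArg_spec : Claim_equal_removeArg := by
  unfold Claim_equal_removeArg
  intro l _ hpre
  unfold Spec_removeArg removeArg removeArg_alt
  unfold Pre_removeArg at hpre
  have htl : ("}" : String).toList = ['}'] := by decide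
  simp only [PySem.Str.find_eq, htl]
  set L := l.toList with hL
  have hne : PySem.Chars.find L ['}'] ≠ -1 := by
    rw [Ne, PySem.Chars.find_eq_neg_one_iff, not_not]
    exact (List.singleton_infix_iff '}' L).mpr hpre
  have hspec := PySem.Chars.findFrom_natCast_spec L ['}'] 0 (Nat.zero_le _)
    (by rw [Nat.cast_zero, PySem.Chars.findFrom_zero]; exact hne)
  rw [Nat.cast_zero, PySem.Chars.findFrom_zero] at hspec
  obtain ⟨-, hpref, hmin'⟩ := hspec
  set c := (PySem.Chars.find L ['}']).toNat with hcdef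
  rw [singleton_prefix_drop] at hpref
  have hc : c < L.length := by
    by_contra hge
    rw [List.getElem?_eq_none (by omega)] at hpref
    simp at hpref
  have hcv : L[c] = '}' := by
    rw [List.getElem?_eq_getElem hc] at hpref
    exact Option.some.inj hpref
  have hmin : ∀ j, j < c → L[j]? ≠ some '}' := by
    intro j hj hcontra
    exact hmin' j (Nat.zero_le _) hj ((singleton_prefix_drop L j '}').mpr hcontra)
  rw [if_neg hne]
  rw [removeArgGo_spec L c hc hcv hmin 0 0 (Nat.zero_le _)]
  rw [lastBrace_eq_altFindOpen]
  simp
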